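-- pv_equiv track=rewrite | github.com/NotDonCitron/bdomarket | utils/pearl_calculator.py | detect_outfit_type
-- ===== SOURCE A (Python) =====
-- from typing import Dict, Optional
--
-- def detect_outfit_type(item_name: str) -> Optional[str]:
--     """
--     Detect outfit type from item name (heuristic).
--
--     Args:
--         item_name: Name of the pearl item
--
--     Returns:
--         Outfit type string or None
--
--     Note: This is a heuristic based on naming patterns.
--           May need adjustment based on actual item names.
--     """
--     name_lower = item_name.lower()
--
--     # Mount gear detection
--     if any(word in name_lower for word in ['horse', 'mount', 'gear', 'saddle', 'stirrup']):
--         return "mount"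
--
--     # Simple outfits (usually have "simple" or are 4-part)
--     if 'simple' in name_lower:
--         return "simple"
--
--     # Classic outfits (usually 6-part, older designs)
--     if 'classic' in name_lower or 'original' in name_lower:
--         return "classic"
--
--     # Premium outfits (7-part, newest designs)
--     # Default assumption for outfit sets
--     if 'outfit' in name_lower or 'set' in name_lower:
--         return "premium"
--
--     # Unknown - default to premium (highest value)
--     return "premium"
-- ===== SOURCE B (Python) =====
-- KEYWORD_LABEL = {
--     'horse': 'mount', 'mount': 'mount', 'gear': 'mount',
--     'saddle': 'mount', 'stirrup': 'mount',
--     'simple': 'simple',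
--     'classic': 'classic', 'original': 'classic',
-- }
--
-- PRIORITY = {'mount': 0, 'simple': 1, 'classic': 2}
--
-- def detect_outfit_type(item_name: str):
--     """Collect ALL matching labels, then pick the highest-priority one (no
--     short-circuit chain); the redundant outfit/set rule collapses into the
--     'premium' default."""
--     name = item_name.lower()
--     matched = [label for kw, label in KEYWORD_LABEL.items() if kw in name]
--     return min(matched, key=PRIORITY.get, default='premium')
-- ===== Notes on version B (the rewrite author's own statement) =====
-- stated objective: simpler
-- what changed: Instead of an early-return branch chain, B collects ALL labels whose keyword occurs via one keyword->label map, returns the minimum by a priority map (defaulting to 'premium'), and drops A's redundant outfit/set branch entirely since it returns the default value anyway.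
import Mathlib
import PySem

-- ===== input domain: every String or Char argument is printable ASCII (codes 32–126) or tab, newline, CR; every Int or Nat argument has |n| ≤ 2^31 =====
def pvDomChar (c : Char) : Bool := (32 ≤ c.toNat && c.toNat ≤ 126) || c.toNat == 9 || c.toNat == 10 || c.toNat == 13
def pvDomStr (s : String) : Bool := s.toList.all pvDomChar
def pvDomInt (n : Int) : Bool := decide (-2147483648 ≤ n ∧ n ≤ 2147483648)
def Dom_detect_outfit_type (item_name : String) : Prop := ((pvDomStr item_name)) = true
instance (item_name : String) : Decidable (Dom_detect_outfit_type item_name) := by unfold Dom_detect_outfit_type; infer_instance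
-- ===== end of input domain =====

-- B collects all matching labels via a keyword->label table and returns the
-- highest-priority match (min by a priority map), default "premium"; objective: simpler.

-- ===== PORT A =====
def detect_outfit_type (item_name : String) : Option String :=
  let name_lower := PySem.Str.lower item_name
  if ["horse", "mount", "gear", "saddle", "stirrup"].any (fun word => PySem.Str.isIn word name_lower) then
    some "mount"
  else if PySem.Str.isIn "simple" name_lower then
    some "simple"
  else if PySem.Str.isIn "classic" name_lower || PySem.Str.isIn "original" name_lower then
    some "classic"
  else if PySem.Str.isIn "outfit" name_lower || PySem.Str.isIn "set" name_lower then
    some "premium"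
  else
    some "premium"

-- ===== PORT B =====
def pvKeywordLabel : List (String × String) :=
  [("horse", "mount"), ("mount", "mount"), ("gear", "mount"),
   ("saddle", "mount"), ("stirrup", "mount"),
   ("simple", "simple"),
   ("classic", "classic"), ("original", "classic")]

def pvPriority : PySem.Dict String Int :=
  PySem.Dict.ofList [("mount", 0), ("simple", 1), ("classic", 2)]

def detect_outfit_type_alt (item_name : String) : Option String :=
  let name := PySem.Str.lower item_name
  let matched := (pvKeywordLabel.filter (fun kv => PySem.Str.isIn kv.1 name)).map (fun kv => kv.2)
  -- PRIORITY.get: every matched label is a key of pvPriority, so getD is exact here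
  some ((PySem.List.min? matched (fun l => PySem.Dict.getD pvPriority l 0)).getD "premium")

-- ===== PRECONDITION & SPEC =====
def Spec_detect_outfit_type (item_name : String) (out : Option String) : Prop := out = detect_outfit_type_alt item_name
instance (item_name : String) (out : Option String) : Decidable (Spec_detect_outfit_type item_name out) := by unfold Spec_detect_outfit_type; infer_instance

-- ===== CLAIM (what is proved, stated in full; the proofs are below) =====
def Claim_equal_detect_outfit_type : Prop := ∀ (item_name : String), Dom_detect_outfit_type item_name → Spec_detect_outfit_type item_name (detect_outfit_type item_name)

-- ===== LEMMAS AND PROOFS =====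

-- ===== VERDICT (by name: the statement is the Claim_ definition above) =====
set_option maxHeartbeats 2000000 in
theorem detect_outfit_type_spec : Claim_equal_detect_outfit_type := by
  intro s _
  unfold Spec_detect_outfit_type detect_outfit_type detect_outfit_type_alt pvKeywordLabel pvPriority
  cases h1 : PySem.Str.isIn "horse" (PySem.Str.lower s) <;>
  cases h2 : PySem.Str.isIn "mount" (PySem.Str.lower s) <;>
  cases h3 : PySem.Str.isIn "gear" (PySem.Str.lower s) <;>
  cases h4 : PySem.Str.isIn "saddle" (PySem.Str.lower s) <;>
  cases h5 : PySem.Str.isIn "stirrup" (PySem.Str.lower s) <;>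
  cases h6 : PySem.Str.isIn "simple" (PySem.Str.lower s) <;>
  cases h7 : PySem.Str.isIn "classic" (PySem.Str.lower s) <;>
  cases h8 : PySem.Str.isIn "original" (PySem.Str.lower s) <;>
    simp_all [PySem.List.min?, PySem.Dict.getD, PySem.Dict.get?, PySem.Dict.ofList] <;> decide
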